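-- pv_equiv track=rewrite | github.com/RoscaStefanAndrei/Proiect-PWA | SmartVest/views.py | _sort_news_by_portfolio
-- ===== SOURCE A (Python) =====
-- TICKER_TO_COMPANY = {
--     'AAPL': 'Apple', 'MSFT': 'Microsoft', 'GOOGL': 'Google', 'GOOG': 'Google',
--     'AMZN': 'Amazon', 'META': 'Meta', 'TSLA': 'Tesla', 'NVDA': 'Nvidia',
--     'NFLX': 'Netflix', 'AMD': 'AMD', 'INTC': 'Intel', 'CRM': 'Salesforce',
--     'ORCL': 'Oracle', 'ADBE': 'Adobe', 'PYPL': 'PayPal', 'DIS': 'Disney',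
--     'BA': 'Boeing', 'JPM': 'JPMorgan', 'V': 'Visa', 'MA': 'Mastercard',
--     'WMT': 'Walmart', 'JNJ': 'Johnson & Johnson', 'PG': 'Procter & Gamble',
--     'UNH': 'UnitedHealth', 'HD': 'Home Depot', 'KO': 'Coca-Cola',
--     'PEP': 'PepsiCo', 'MRK': 'Merck', 'ABBV': 'AbbVie', 'AVGO': 'Broadcom',
--     'COST': 'Costco', 'TMO': 'Thermo Fisher', 'MCD': "McDonald's",
--     'ACN': 'Accenture', 'LIN': 'Linde', 'CSCO': 'Cisco', 'TXN': 'Texas Instruments',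
--     'QCOM': 'Qualcomm', 'IBM': 'IBM', 'GE': 'General Electric', 'CAT': 'Caterpillar',
--     'UBER': 'Uber', 'COIN': 'Coinbase', 'SQ': 'Block', 'SHOP': 'Shopify',
--     'SNAP': 'Snap', 'PLTR': 'Palantir', 'RIVN': 'Rivian', 'LCID': 'Lucid',
--     'F': 'Ford', 'GM': 'General Motors', 'T': 'AT&T', 'VZ': 'Verizon',
--     'XOM': 'Exxon Mobil', 'CVX': 'Chevron', 'COP': 'ConocoPhillips',
-- }
--
-- def _sort_news_by_portfolio(news_results, tickers):
--     """Sort news so articles mentioning portfolio tickers appear first."""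
--     if not tickers:
--         return news_results
--
--     search_terms = {}
--     for ticker in tickers:
--         company = TICKER_TO_COMPANY.get(ticker)
--         search_terms[ticker] = [ticker]
--         if company:
--             search_terms[ticker].append(company.lower())
--
--     def relevance_score(article):
--         text = (
--             (article.get('title') or '') + ' ' + (article.get('description') or '')
--         ).lower()
--         score = 0
--         for ticker, terms in search_terms.items():
--             for term in terms:
--                 if term.lower() in text:
--                     score += 1
--                     break
--         return score
--
--     return sorted(news_results, key=relevance_score, reverse=True)
-- ===== SOURCE B (Python) =====
-- TICKER_TO_COMPANY = {
--     'AAPL': 'Apple', 'MSFT': 'Microsoft', 'GOOGL': 'Google', 'GOOG': 'Google',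
--     'AMZN': 'Amazon', 'META': 'Meta', 'TSLA': 'Tesla', 'NVDA': 'Nvidia',
--     'NFLX': 'Netflix', 'AMD': 'AMD', 'INTC': 'Intel', 'CRM': 'Salesforce',
--     'ORCL': 'Oracle', 'ADBE': 'Adobe', 'PYPL': 'PayPal', 'DIS': 'Disney',
--     'BA': 'Boeing', 'JPM': 'JPMorgan', 'V': 'Visa', 'MA': 'Mastercard',
--     'WMT': 'Walmart', 'JNJ': 'Johnson & Johnson', 'PG': 'Procter & Gamble',
--     'UNH': 'UnitedHealth', 'HD': 'Home Depot', 'KO': 'Coca-Cola',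
--     'PEP': 'PepsiCo', 'MRK': 'Merck', 'ABBV': 'AbbVie', 'AVGO': 'Broadcom',
--     'COST': 'Costco', 'TMO': 'Thermo Fisher', 'MCD': "McDonald's",
--     'ACN': 'Accenture', 'LIN': 'Linde', 'CSCO': 'Cisco', 'TXN': 'Texas Instruments',
--     'QCOM': 'Qualcomm', 'IBM': 'IBM', 'GE': 'General Electric', 'CAT': 'Caterpillar',
--     'UBER': 'Uber', 'COIN': 'Coinbase', 'SQ': 'Block', 'SHOP': 'Shopify',
--     'SNAP': 'Snap', 'PLTR': 'Palantir', 'RIVN': 'Rivian', 'LCID': 'Lucid',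
--     'F': 'Ford', 'GM': 'General Motors', 'T': 'AT&T', 'VZ': 'Verizon',
--     'XOM': 'Exxon Mobil', 'CVX': 'Chevron', 'COP': 'ConocoPhillips',
-- }
--
-- def _sort_news_by_portfolio(news_results, tickers):
--     """Bucket articles by relevance score in a dict, then emit buckets highest score first."""
--     if not tickers:
--         return news_results
--
--     groups = []
--     for ticker in dict.fromkeys(tickers):
--         terms = [ticker]
--         company = TICKER_TO_COMPANY.get(ticker)
--         if company:
--             terms.append(company.lower())
--         groups.append(terms)
--
--     buckets = {}
--     for article in news_results:
--         text = (
--             (article.get('title') or '') + ' ' + (article.get('description') or '')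
--         ).lower()
--         score = sum(1 for terms in groups if any(term.lower() in text for term in terms))
--         buckets.setdefault(score, []).append(article)
--
--     result = []
--     for score in sorted(buckets, reverse=True):
--         result += buckets[score]
--     return result
-- ===== Notes on version B (the rewrite author's own statement) =====
-- stated objective: alternative
-- what changed: Replaces the per-ticker search_terms dict and sorted(..., key=relevance_score, reverse=True) by a flat list of term groups over deduplicated tickers, a sum/any-based score, and a bucket dict keyed by score whose buckets (filled in input order) are concatenated for the scores sorted descending, reproducing the stable reverse-sort order exactly.
import Mathlib
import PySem

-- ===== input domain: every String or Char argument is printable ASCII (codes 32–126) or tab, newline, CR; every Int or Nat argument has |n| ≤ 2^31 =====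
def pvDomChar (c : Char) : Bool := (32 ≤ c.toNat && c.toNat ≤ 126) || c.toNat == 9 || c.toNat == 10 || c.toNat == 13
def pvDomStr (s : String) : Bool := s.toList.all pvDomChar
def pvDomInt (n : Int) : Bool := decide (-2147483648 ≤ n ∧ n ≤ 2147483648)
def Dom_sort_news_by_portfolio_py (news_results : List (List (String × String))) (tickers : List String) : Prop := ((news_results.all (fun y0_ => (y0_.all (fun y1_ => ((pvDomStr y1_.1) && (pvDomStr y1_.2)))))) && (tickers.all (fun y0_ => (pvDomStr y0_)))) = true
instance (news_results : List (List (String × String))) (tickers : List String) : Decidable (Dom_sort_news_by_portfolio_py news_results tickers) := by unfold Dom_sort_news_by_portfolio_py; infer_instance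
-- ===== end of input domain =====

-- B replaces A's per-ticker search_terms dict + stable reverse sort by: a flat list of term
-- groups over the deduplicated tickers, a sum/any score, and a bucket dict keyed by score,
-- emitted for the scores sorted descending (buckets filled in input order), which reproduces
-- the stable reverse-sort order exactly.

-- ===== PORT A =====
-- module constant TICKER_TO_COMPANY (shared by both sources)
def pvTickerToCompany : PySem.Dict String String := PySem.Dict.ofList [
  ("AAPL", "Apple"), ("MSFT", "Microsoft"), ("GOOGL", "Google"), ("GOOG", "Google"),
  ("AMZN", "Amazon"), ("META", "Meta"), ("TSLA", "Tesla"), ("NVDA", "Nvidia"),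
  ("NFLX", "Netflix"), ("AMD", "AMD"), ("INTC", "Intel"), ("CRM", "Salesforce"),
  ("ORCL", "Oracle"), ("ADBE", "Adobe"), ("PYPL", "PayPal"), ("DIS", "Disney"),
  ("BA", "Boeing"), ("JPM", "JPMorgan"), ("V", "Visa"), ("MA", "Mastercard"),
  ("WMT", "Walmart"), ("JNJ", "Johnson & Johnson"), ("PG", "Procter & Gamble"),
  ("UNH", "UnitedHealth"), ("HD", "Home Depot"), ("KO", "Coca-Cola"),
  ("PEP", "PepsiCo"), ("MRK", "Merck"), ("ABBV", "AbbVie"), ("AVGO", "Broadcom"),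
  ("COST", "Costco"), ("TMO", "Thermo Fisher"), ("MCD", "McDonald's"),
  ("ACN", "Accenture"), ("LIN", "Linde"), ("CSCO", "Cisco"), ("TXN", "Texas Instruments"),
  ("QCOM", "Qualcomm"), ("IBM", "IBM"), ("GE", "General Electric"), ("CAT", "Caterpillar"),
  ("UBER", "Uber"), ("COIN", "Coinbase"), ("SQ", "Block"), ("SHOP", "Shopify"),
  ("SNAP", "Snap"), ("PLTR", "Palantir"), ("RIVN", "Rivian"), ("LCID", "Lucid"),
  ("F", "Ford"), ("GM", "General Motors"), ("T", "AT&T"), ("VZ", "Verizon"),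
  ("XOM", "Exxon Mobil"), ("CVX", "Chevron"), ("COP", "ConocoPhillips")]

-- A's search_terms loop (`if company:` is None/'' falsy)
def pvSearchTerms (tickers : List String) : PySem.Dict String (List String) :=
  tickers.foldl (fun d ticker =>
    let d := d.insert ticker [ticker]
    match PySem.Dict.get? pvTickerToCompany ticker with
    | some company => if company = "" then d else d.insert ticker [ticker, PySem.Str.lower company]
    | none => d) PySem.Dict.empty

-- A's relevance_score; the inner for-with-break is List.any
def pvRelevance (st : PySem.Dict String (List String)) (article : List (String × String)) : Int :=
  let text := PySem.Str.lower
    ((PySem.Dict.getD (PySem.Dict.mk article) "title" "") ++ " " ++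
     (PySem.Dict.getD (PySem.Dict.mk article) "description" ""))
  st.items.foldl
    (fun score p => if p.2.any (fun term => PySem.Str.isIn (PySem.Str.lower term) text) then score + 1 else score)
    0

def sort_news_by_portfolio_py (news_results : List (List (String × String))) (tickers : List String) : List (List (String × String)) :=
  if tickers = [] then news_results
  else
    let st := pvSearchTerms tickers
    PySem.List.sorted news_results (fun article => pvRelevance st article) true

-- ===== PORT B =====
-- B's groups loop: for ticker in dict.fromkeys(tickers): … groups.append(terms)
def altGroups (tickers : List String) : List (List String) :=
  (PySem.List.dedup tickers).foldl (fun gs ticker =>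
    let terms : List String := [ticker]
    let terms := match PySem.Dict.get? pvTickerToCompany ticker with
      | some company => if company = "" then terms else terms ++ [PySem.Str.lower company]
      | none => terms
    gs ++ [terms]) []

-- B's score: sum(1 for terms in groups if any(term.lower() in text for term in terms))
def altScore (groups : List (List String)) (text : String) : Int :=
  (groups.map (fun terms =>
    if terms.any (fun term => PySem.Str.isIn (PySem.Str.lower term) text) then (1 : Int) else 0)).sum

def sort_news_by_portfolio_py_alt (news_results : List (List (String × String))) (tickers : List String) : List (List (String × String)) :=
  if tickers = [] then news_results
  else
    let groups := altGroups tickers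
    -- buckets.setdefault(score, []).append(article)  ==  buckets[score] = buckets.get(score, []) + [article]
    let buckets : PySem.Dict Int (List (List (String × String))) :=
      news_results.foldl (fun d article =>
        let text := PySem.Str.lower
          ((PySem.Dict.getD (PySem.Dict.mk article) "title" "") ++ " " ++
           (PySem.Dict.getD (PySem.Dict.mk article) "description" ""))
        d.modify (altScore groups text) [] (fun b => b ++ [article])) PySem.Dict.empty
    -- result = []; for score in sorted(buckets, reverse=True): result += buckets[score]
    (PySem.List.sorted buckets.keys (fun s => s) true).foldl
      (fun result s => result ++ buckets.getD s []) []

-- ===== PRECONDITION & SPEC =====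
def Spec_sort_news_by_portfolio_py (news_results : List (List (String × String))) (tickers : List String) (out : List (List (String × String))) : Prop := out = sort_news_by_portfolio_py_alt news_results tickers
instance (news_results : List (List (String × String))) (tickers : List String) (out : List (List (String × String))) : Decidable (Spec_sort_news_by_portfolio_py news_results tickers out) := by unfold Spec_sort_news_by_portfolio_py; infer_instance

-- ===== CLAIM (what is proved, stated in full; the proofs are below) =====
def Claim_equal_sort_news_by_portfolio_py : Prop := ∀ (news_results : List (List (String × String))) (tickers : List String), Dom_sort_news_by_portfolio_py news_results tickers → Spec_sort_news_by_portfolio_py news_results tickers (sort_news_by_portfolio_py news_results tickers)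

-- ===== LEMMAS AND PROOFS =====

-- the terms list A's loop ends up storing for a ticker (also the group B builds for it)
def pvTermsOf (t : String) : List String :=
  match PySem.Dict.get? pvTickerToCompany t with
  | some company => if company = "" then [t] else [t, PySem.Str.lower company]
  | none => [t]

-- a fold of inserts whose value depends only on the key: items = dedup'd keys paired with values
theorem items_foldl_insert_fun (V : String → List String) (ts s : List String) (hs : s.Nodup) :
    (ts.foldl (fun d t => d.insert t (V t))
        (PySem.Dict.mk (s.map (fun t => (t, V t))))).items
      = (PySem.Set.update s ts).map (fun t => (t, V t)) := by
  induction ts generalizing s with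
  | nil => simp [PySem.Set.update]
  | cons t ts ih =>
      have hkeys : (PySem.Dict.mk (s.map (fun t => (t, V t)))).keys = s := by
        simp [PySem.Dict.keys_mk, List.map_map, Function.comp_def]
      by_cases hmem : t ∈ s
      · have hc : (PySem.Dict.mk (s.map (fun t => (t, V t)))).contains t = true := by
          rw [PySem.Dict.contains_iff_mem_keys, hkeys]; exact hmem
        have hins : (PySem.Dict.mk (s.map (fun t => (t, V t)))).insert t (V t)
            = PySem.Dict.mk (s.map (fun t => (t, V t))) := by
          apply PySem.Dict.ext
          rw [PySem.Dict.items_insert_of_contains _ _ hc]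
          rw [List.map_map]
          apply List.map_congr_left
          intro x _
          by_cases hx : x = t
          · subst hx; simp
          · simp [Function.comp, hx]
        have hadd : PySem.Set.add s t = s := by simp [PySem.Set.add, PySem.Set.contains, hmem]
        simp only [List.foldl_cons, hins]
        rw [ih s hs]
        simp [PySem.Set.update, hadd]
      · have hc : (PySem.Dict.mk (s.map (fun t => (t, V t)))).contains t = false := by
          rw [Bool.eq_false_iff]
          intro h
          rw [PySem.Dict.contains_iff_mem_keys, hkeys] at h
          exact hmem h
        have hins : (PySem.Dict.mk (s.map (fun t => (t, V t)))).insert t (V t)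
            = PySem.Dict.mk ((s ++ [t]).map (fun t => (t, V t))) := by
          apply PySem.Dict.ext
          rw [PySem.Dict.items_insert_of_not_contains _ _ hc]
          simp
        have hadd : PySem.Set.add s t = s ++ [t] := by
          simp [PySem.Set.add, PySem.Set.contains, hmem]
        simp only [List.foldl_cons, hins]
        rw [ih (s ++ [t]) (by
          simp [List.nodup_append, hs]
          intro a ha hat
          exact hmem (hat ▸ ha))]
        simp [PySem.Set.update, hadd]

-- A's search_terms dict, characterised: distinct tickers in first-occurrence order,
-- each paired with its terms list
theorem pvSearchTerms_items (tickers : List String) :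
    (pvSearchTerms tickers).items
      = (PySem.List.dedup tickers).map (fun t => (t, pvTermsOf t)) := by
  have hstep : pvSearchTerms tickers
      = tickers.foldl (fun d t => d.insert t (pvTermsOf t)) PySem.Dict.empty := by
    unfold pvSearchTerms
    apply PySem.List.foldl_congr_mem
    intro d t _
    unfold pvTermsOf
    cases h : PySem.Dict.get? pvTickerToCompany t with
    | none => simp
    | some company =>
        by_cases hc : company = ""
        · simp [hc]
        · simp only [hc, if_false]
          exact PySem.Dict.insert_insert_self d t [t] [t, PySem.Str.lower company]
  rw [hstep]
  have : (PySem.Dict.empty : PySem.Dict String (List String))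
      = PySem.Dict.mk (([] : List String).map (fun t => (t, pvTermsOf t))) := rfl
  rw [this, items_foldl_insert_fun pvTermsOf tickers [] List.nodup_nil]
  rfl

-- B's groups are exactly the terms lists of A's dict, in the same order
theorem altGroups_eq (tickers : List String) :
    altGroups tickers = (PySem.List.dedup tickers).map pvTermsOf := by
  unfold altGroups
  have hstep : (PySem.List.dedup tickers).foldl (fun gs ticker =>
      let terms : List String := [ticker]
      let terms := match PySem.Dict.get? pvTickerToCompany ticker with
        | some company => if company = "" then terms else terms ++ [PySem.Str.lower company]
        | none => terms
      gs ++ [terms]) []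
      = (PySem.List.dedup tickers).foldl (fun gs t => gs ++ [pvTermsOf t]) [] := by
    apply PySem.List.foldl_congr_mem
    intro gs t _
    unfold pvTermsOf
    cases h : PySem.Dict.get? pvTickerToCompany t with
    | none => simp
    | some company => by_cases hc : company = "" <;> simp [hc]
  rw [hstep, PySem.List.foldl_append_singleton_eq_map]
  simp

-- the two scores agree (both are a count over the deduplicated tickers)
theorem score_eq (tickers : List String) (article : List (String × String)) :
    pvRelevance (pvSearchTerms tickers) article
      = altScore (altGroups tickers)
          (PySem.Str.lower
            ((PySem.Dict.getD (PySem.Dict.mk article) "title" "") ++ " " ++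
             (PySem.Dict.getD (PySem.Dict.mk article) "description" ""))) := by
  unfold pvRelevance altScore
  rw [PySem.List.foldl_if_add_one, PySem.List.sum_map_ite_one_zero]
  rw [pvSearchTerms_items, altGroups_eq]
  simp [List.countP_map, Function.comp_def]

-- insertBy walks past a prefix it is not `before`
theorem insertBy_append_left {α : Type} (before : α → α → Bool) (x : α) (l m : List α)
    (h : ∀ y ∈ l, before x y = false) :
    PySem.List.insertBy before x (l ++ m) = l ++ PySem.List.insertBy before x m := by
  induction l with
  | nil => simp
  | cons y l ih =>
      simp only [List.cons_append, PySem.List.insertBy, h y (by simp)]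
      simp only [Bool.false_eq_true, if_false]
      rw [ih (fun z hz => h z (by simp [hz]))]

-- insertBy stops immediately when it is `before` everything
theorem insertBy_all_before {α : Type} (before : α → α → Bool) (x : α) (m : List α)
    (h : ∀ y ∈ m, before x y = true) :
    PySem.List.insertBy before x m = x :: m := by
  cases m with
  | nil => rfl
  | cons y m => simp [PySem.List.insertBy, h y (by simp)]

-- inserting x into a score-descending concatenation of buckets appends it to its bucket
theorem insert_flatMap {α : Type} (key : α → Int) (x : α) (ds : List Int) (p : List α)
    (hds : ds.Pairwise (· > ·)) (hk : key x ∈ ds) :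
    PySem.List.insertBy (fun a b => decide (key b < key a)) x
        (ds.flatMap (fun i => p.filter (fun a => decide (key a = i))))
      = ds.flatMap (fun i => (p ++ [x]).filter (fun a => decide (key a = i))) := by
  induction ds with
  | nil => simp at hk
  | cons d ds ih =>
      rw [List.pairwise_cons] at hds
      simp only [List.flatMap_cons]
      by_cases hxd : key x = d
      · rw [insertBy_append_left _ _ _ _ (by
          intro y hy
          simp only [List.mem_filter, decide_eq_true_eq] at hy
          simp [hy.2, hxd])]
        rw [insertBy_all_before _ _ _ (by
          intro y hy
          simp only [List.mem_flatMap, List.mem_filter, decide_eq_true_eq] at hy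
          obtain ⟨i, hi, _, hki⟩ := hy
          simp [hki, hxd, hds.1 i hi])]
        have h1 : (p ++ [x]).filter (fun a => decide (key a = d)) =
            p.filter (fun a => decide (key a = d)) ++ [x] := by
          simp [List.filter_append, hxd]
        have h2 : ds.flatMap (fun i => (p ++ [x]).filter (fun a => decide (key a = i))) =
            ds.flatMap (fun i => p.filter (fun a => decide (key a = i))) := by
          apply List.flatMap_congr
          intro i hi
          have : key x ≠ i := by
            have := hds.1 i hi; omega
          simp [List.filter_append, this]
        rw [h1, h2]
        simp
      · have hk' : key x ∈ ds := by
          rcases List.mem_cons.mp hk with h | h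
          · exact absurd h hxd
          · exact h
        rw [insertBy_append_left _ _ _ _ (by
          intro y hy
          simp only [List.mem_filter, decide_eq_true_eq] at hy
          have : d > key x := hds.1 _ hk'
          simp [hy.2]; omega)]
        rw [ih hds.2 hk']
        have : (p ++ [x]).filter (fun a => decide (key a = d)) =
            p.filter (fun a => decide (key a = d)) := by
          simp [List.filter_append, hxd]
        rw [this]

-- Python's stable reverse sort IS the concatenation of buckets in descending key order
theorem sorted_rev_eq_flatMap {α : Type} (key : α → Int) (ds : List Int)
    (hds : ds.Pairwise (· > ·)) (xs : List α) (hmem : ∀ a ∈ xs, key a ∈ ds) :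
    PySem.List.sorted xs key true
      = ds.flatMap (fun i => xs.filter (fun a => decide (key a = i))) := by
  induction xs using List.reverseRecOn with
  | nil => simp [PySem.List.sorted]
  | append_singleton xs x ih =>
      rw [PySem.List.sorted_rev_eq_foldl_insertBy, List.foldl_append]
      simp only [List.foldl_cons, List.foldl_nil]
      rw [← PySem.List.sorted_rev_eq_foldl_insertBy]
      rw [ih (fun a ha => hmem a (by simp [ha]))]
      exact insert_flatMap key x ds xs hds (hmem x (by simp))

-- reverse insertion keeps a descending list descending
theorem insertBy_rev_pairwise_ge (x : Int) (l : List Int)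
    (h : l.Pairwise (· ≥ ·)) :
    (PySem.List.insertBy (fun a b => decide (b < a)) x l).Pairwise (· ≥ ·) := by
  induction l with
  | nil => simp [PySem.List.insertBy]
  | cons y l ih =>
      rw [List.pairwise_cons] at h
      simp only [PySem.List.insertBy]
      by_cases hlt : y < x
      · simp only [hlt, decide_true, if_true, List.pairwise_cons]
        refine ⟨fun z hz => ?_, h.1, h.2⟩
        rcases List.mem_cons.mp hz with rfl | hz
        · omega
        · have := h.1 z hz; omega
      · simp only [hlt, decide_false, Bool.false_eq_true, if_false, List.pairwise_cons]
        refine ⟨fun z hz => ?_, ih h.2⟩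
        rcases (PySem.List.mem_insertBy _ _ _ _).mp hz with rfl | hz
        · omega
        · exact h.1 z hz

-- sorted(_, reverse=True) of a list is pairwise ≥
theorem sorted_rev_pairwise_ge (xs : List Int) :
    (PySem.List.sorted xs (fun s => s) true).Pairwise (· ≥ ·) := by
  rw [PySem.List.sorted_rev_eq_foldl_insertBy]
  induction xs using List.reverseRecOn with
  | nil => simp
  | append_singleton xs x ih =>
      rw [List.foldl_append]
      simp only [List.foldl_cons, List.foldl_nil]
      exact insertBy_rev_pairwise_ge x _ ih

-- ===== VERDICT (by name: the statement is the Claim_ definition above) =====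
theorem sort_news_by_portfolio_py_spec : Claim_equal_sort_news_by_portfolio_py := by
  intro news_results tickers _
  unfold Spec_sort_news_by_portfolio_py
  unfold sort_news_by_portfolio_py sort_news_by_portfolio_py_alt
  by_cases ht : tickers = []
  · simp [ht]
  · simp only [ht, if_false]
    set groups := altGroups tickers with hgroups
    set score : List (String × String) → Int := fun article =>
      altScore groups
        (PySem.Str.lower
          ((PySem.Dict.getD (PySem.Dict.mk article) "title" "") ++ " " ++
           (PySem.Dict.getD (PySem.Dict.mk article) "description" ""))) with hscore
    -- B's bucket dict, as a fold over (score, article) pairs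
    have hfold : news_results.foldl (fun d article =>
        let text := PySem.Str.lower
          ((PySem.Dict.getD (PySem.Dict.mk article) "title" "") ++ " " ++
           (PySem.Dict.getD (PySem.Dict.mk article) "description" ""))
        d.modify (altScore groups text) [] (fun b => b ++ [article])) PySem.Dict.empty
        = (news_results.map (fun a => (score a, a))).foldl
            (fun d p => d.modify p.1 [] (fun b => b ++ [p.2])) PySem.Dict.empty := by
      rw [List.foldl_map]
    rw [hfold]
    set buckets := (news_results.map (fun a => (score a, a))).foldl
        (fun d p => d.modify p.1 [] (fun b => b ++ [p.2])) PySem.Dict.empty with hbuckets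
    -- bucket contents: the articles of that score, in input order
    have hgetD : ∀ c : Int, buckets.getD c []
        = news_results.filter (fun a => decide (score a = c)) := by
      intro c
      rw [hbuckets, PySem.Dict.getD_foldl_modify_append]
      rw [List.filter_map, List.map_map]
      simp [Function.comp_def]
      apply List.filter_congr
      intro a _
      exact Bool.beq_eq_decide_eq _ c
    -- bucket keys: the distinct scores, first occurrence order
    have hkeys : buckets.keys = PySem.Set.ofList (news_results.map score) := by
      rw [hbuckets]
      rw [PySem.Dict.keys_foldl_modify_key (news_results.map (fun a => (score a, a)))
            (fun p => p.1) [] (fun _ p b => b ++ [p.2]) PySem.Dict.empty]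
      simp [List.map_map, Function.comp_def, PySem.Set.update, PySem.Set.ofList_eq_foldl]
    set ds := PySem.List.sorted buckets.keys (fun s => s) true with hds
    -- ds is strictly descending
    have hnodup : ds.Nodup :=
      ((PySem.List.sorted_perm buckets.keys (fun s => s) true).nodup_iff).mpr
        (by rw [hkeys]; exact PySem.Set.nodup_ofList _)
    have hdesc : ds.Pairwise (· > ·) := by
      have hge := sorted_rev_pairwise_ge buckets.keys
      rw [← hds] at hge
      exact (List.Pairwise.and hge hnodup).imp (fun h => by omega)
    -- every article's score occurs among the sorted keys
    have hmem : ∀ a ∈ news_results, score a ∈ ds := by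
      intro a ha
      rw [hds, (PySem.List.sorted_perm buckets.keys (fun s => s) true).mem_iff, hkeys,
          PySem.Set.mem_ofList]
      exact List.mem_map_of_mem ha
    -- A's relevance key equals B's score on every article
    have hkeyeq : ∀ a, pvRelevance (pvSearchTerms tickers) a = score a := by
      intro a
      rw [hscore, hgroups]
      exact score_eq tickers a
    -- A side: the stable reverse sort is the descending concatenation of buckets
    rw [sorted_rev_eq_flatMap (fun a => pvRelevance (pvSearchTerms tickers) a) ds hdesc
          news_results (fun a ha => by simpa [hkeyeq a] using hmem a ha)]
    -- B side: the result loop is the same concatenation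
    rw [PySem.List.foldl_append_eq_flatMap]
    rw [List.nil_append]
    apply List.flatMap_congr
    intro i _
    rw [hgetD i]
    apply List.filter_congr
    intro a _
    rw [hkeyeq a]
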